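-- pv_equiv track=rewrite | github.com/Flanker35B/codewars | 6 kyu/The Union Jack.py | union_jack
-- ===== SOURCE A (Python) =====
-- from math import ceil
--
-- def union_jack(n):
--     if not isinstance(n, (int, float)):
--         return False
--     n = max(7, ceil(n))
--     res=s=''
--     pol,nech=divmod(n - 1, 2)
--     for i in range(0,pol):
--         pol_str='-'*i+'X'+'-'*(pol-i-1)
--         res+=pol_str+'X'*(nech+1)+pol_str[::-1]+'\n'
--     s+=res+('X'*n+'\n')*(nech+1)+res[len(res)-2::-1]
--     return s
-- ===== SOURCE B (Python) =====
-- from math import ceil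
--
-- def union_jack(n):
--     if not isinstance(n, (int, float)):
--         return False
--     n = max(7, ceil(n))
--     pol, nech = divmod(n - 1, 2)
--     rows = []
--     for r in range(n):
--         if pol <= r <= pol + nech:
--             rows.append('X' * n)
--         else:
--             row = ['-'] * n
--             row[pol:pol + nech + 1] = 'X' * (nech + 1)
--             row[r] = 'X'
--             row[n - 1 - r] = 'X'
--             rows.append(''.join(row))
--     return '\n'.join(rows)
-- ===== Notes on version B (the rewrite author's own statement) =====
-- stated objective: alternative
-- what changed: Replaces A's build-top-half-with-string-slicing-then-mirror-via-reversed-slice construction by a direct full-grid pass: every row starts as a dash buffer into which the centre band, the diagonal cell and the anti-diagonal cell are painted by index, and the rows are joined with newlines.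
import Mathlib
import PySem

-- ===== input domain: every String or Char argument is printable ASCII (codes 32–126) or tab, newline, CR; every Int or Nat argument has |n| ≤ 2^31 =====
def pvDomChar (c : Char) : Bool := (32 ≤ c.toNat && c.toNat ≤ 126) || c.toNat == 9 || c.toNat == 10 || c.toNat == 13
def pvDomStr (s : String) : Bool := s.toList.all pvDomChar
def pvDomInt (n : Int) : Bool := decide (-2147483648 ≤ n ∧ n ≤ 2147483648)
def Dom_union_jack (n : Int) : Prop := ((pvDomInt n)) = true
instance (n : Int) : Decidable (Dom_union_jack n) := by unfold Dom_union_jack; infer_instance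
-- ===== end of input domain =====

-- B replaces A's build-top-half-then-mirror-by-reversed-slice construction with a single
-- closed-form per-cell predicate over the whole grid (objective: simpler; not faster).
-- The Int signature makes the isinstance guard of both Pythons vacuous; ceil(n) = n on int.

-- ===== PORT A =====
-- A's body on the character-list level (n already replaced by max(7, ceil(n)) = max 7 n).
def jackA (m : Int) : List Char :=
  let pol := PySem.Int.floordiv (m - 1) 2
  let nech := PySem.Int.mod (m - 1) 2
  let res := (PySem.List.pyRange 0 pol).foldl (fun res i =>
    let pol_str := PySem.List.pyRepeat ['-'] i ++ ['X'] ++ PySem.List.pyRepeat ['-'] (pol - i - 1)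
    res ++ (pol_str ++ PySem.List.pyRepeat ['X'] (nech + 1)
            ++ (PySem.List.slice? pol_str none none (-1)).getD [] ++ ['\n'])) []
  res ++ PySem.List.pyRepeat (PySem.List.pyRepeat ['X'] m ++ ['\n']) (nech + 1)
      ++ (PySem.List.slice? res (some ((res.length : Int) - 2)) none (-1)).getD []

def union_jack (n : Int) : String := String.ofList (jackA (max 7 n))

-- ===== PORT B =====
-- B's body: per-cell closed-form predicate, rows joined with '\n'.
def jackB (m : Int) : List Char :=
  let pol := PySem.Int.floordiv (m - 1) 2
  let nech := PySem.Int.mod (m - 1) 2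
  PySem.Chars.join ['\n'] ((PySem.List.pyRange 0 m).map (fun r =>
    if pol ≤ r ∧ r ≤ pol + nech then
      PySem.List.pyRepeat ['X'] m
    else
      -- row[pol:pol+nech+1] = 'X'*(nech+1) is a list slice assignment, hand-ported as
      -- take/middle/drop; exact here since 0 ≤ pol and pol+nech+1 ≤ len(row).
      -- row[r] = 'X' and row[n-1-r] = 'X' are in-range assignments (0 ≤ r < n): List.set.
      let row := PySem.List.pyRepeat ['-'] m
      let row := row.take pol.toNat ++ PySem.List.pyRepeat ['X'] (nech + 1)
                   ++ row.drop (pol + nech + 1).toNat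
      let row := row.set r.toNat 'X'
      let row := row.set (m - 1 - r).toNat 'X'
      row))

def union_jack_alt (n : Int) : String := String.ofList (jackB (max 7 n))

-- ===== PRECONDITION & SPEC =====
def Spec_union_jack (n : Int) (out : String) : Prop := out = union_jack_alt n
instance (n : Int) (out : String) : Decidable (Spec_union_jack n out) := by unfold Spec_union_jack; infer_instance

-- ===== CLAIM (what is proved, stated in full; the proofs are below) =====
def Claim_equal_union_jack : Prop := ∀ (n : Int), Dom_union_jack n → Spec_union_jack n (union_jack n)

-- ===== LEMMAS AND PROOFS =====

-- canonical row descriptions (proof-side only)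
def pstrL (P i : Nat) : List Char :=
  List.replicate i '-' ++ ['X'] ++ List.replicate (P - 1 - i) '-'
def lineT (P E i : Nat) : List Char :=
  pstrL P i ++ List.replicate (E + 1) 'X' ++ (pstrL P i).reverse
def xrowL (P E : Nat) : List Char := List.replicate (2 * P + E + 1) 'X'
def rowsJ (P E : Nat) : List (List Char) :=
  (List.range P).map (lineT P E) ++ List.replicate (E + 1) (xrowL P E)
    ++ (List.range P).map (fun j => lineT P E (P - 1 - j))

theorem pstrL_reverse (P i : Nat) :
    (pstrL P i).reverse = List.replicate (P - 1 - i) '-' ++ ['X'] ++ List.replicate i '-' := by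
  simp [pstrL]
theorem lineT_length (P E i : Nat) (hi : i < P) : (lineT P E i).length = 2 * P + E + 1 := by
  simp [lineT, pstrL]; omega

theorem lineT_getElem (P E i c : Nat) (hi : i < P)
    (h : c < (lineT P E i).length) :
    (lineT P E i)[c] = (if c = i ∨ c = 2 * P + E - i ∨ (P ≤ c ∧ c ≤ P + E) then 'X' else '-') := by
  have hc : c < 2 * P + E + 1 := by rw [lineT_length P E i hi] at h; exact h
  unfold lineT
  simp only [pstrL_reverse]
  simp only [pstrL, List.getElem_append, List.length_append, List.length_replicate,
    List.length_cons, List.length_nil, List.getElem_replicate, List.getElem_singleton]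
  split_ifs <;> first | rfl | omega

theorem intercalate_cons2 (c : Char) (a b : List Char) (u : List (List Char)) :
    List.intercalate [c] (a :: b :: u) = a ++ [c] ++ List.intercalate [c] (b :: u) := by
  simp [List.intercalate, List.intersperse]

theorem flatMap_newline_eq (c : Char) (rs : List (List Char)) (h : rs ≠ []) :
    rs.flatMap (fun r => r ++ [c]) = List.intercalate [c] rs ++ [c] := by
  induction rs with
  | nil => simp at h
  | cons a t ih =>
    cases t with
    | nil => simp [List.intercalate]
    | cons b u =>
      simp only [List.flatMap_cons] at *
      rw [ih (by simp), intercalate_cons2]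
      simp [List.append_assoc]

theorem intercalate_append_ne (c : Char) (xs ys : List (List Char)) (hx : xs ≠ []) (hy : ys ≠ []) :
    List.intercalate [c] (xs ++ ys) =
      List.intercalate [c] xs ++ [c] ++ List.intercalate [c] ys := by
  induction xs with
  | nil => simp at hx
  | cons a t ih =>
    cases t with
    | nil =>
      cases ys with
      | nil => simp at hy
      | cons b u =>
        rw [show [a] ++ b :: u = a :: b :: u from rfl, intercalate_cons2]
        simp [List.intercalate, List.append_assoc]
    | cons b u =>
      have h2 := ih (by simp)
      have e1 : (a :: b :: u) ++ ys = a :: ((b :: u) ++ ys) := by simp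
      rw [e1]
      cases h3 : (b :: u) ++ ys with
      | nil => simp at h3
      | cons x v =>
        rw [← h3, show (b :: u) ++ ys = b :: (u ++ ys) from by simp] at *
        rw [intercalate_cons2, h2, intercalate_cons2]
        simp [List.append_assoc]

theorem intercalate_reverse (c : Char) (rs : List (List Char)) :
    (List.intercalate [c] rs).reverse = List.intercalate [c] (rs.reverse.map List.reverse) := by
  induction rs with
  | nil => simp [List.intercalate]
  | cons a t ih =>
    cases t with
    | nil => simp [List.intercalate]
    | cons b u =>
      rw [intercalate_cons2, List.reverse_append, List.reverse_append, ih]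
      have hne : ((b :: u).reverse.map List.reverse) ≠ [] := by simp
      rw [show (a :: b :: u).reverse.map List.reverse
            = ((b :: u).reverse.map List.reverse) ++ [a.reverse] from by simp,
        intercalate_append_ne c _ _ hne (by simp)]
      simp [List.intercalate, List.append_assoc]

theorem reverse_range (P : Nat) :
    (List.range P).reverse = (List.range P).map (fun j => P - 1 - j) := by
  apply List.ext_getElem (by simp)
  intro i h1 h2
  simp only [List.getElem_reverse, List.getElem_map, List.getElem_range, List.length_range]


theorem filterMap_range_eq_map {A : Type} (c : Nat) (f : Nat → Option A) (g : Nat → A)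
    (h : ∀ k < c, f k = some (g k)) :
    List.filterMap f (List.range c) = (List.range c).map g := by
  induction c with
  | zero => simp
  | succ m ih =>
    rw [List.range_succ, List.filterMap_append, ih (fun k hk => h k (by omega))]
    simp [h m (by omega)]

theorem slice_last2 (xs : List Char) (h : 2 ≤ xs.length) :
    PySem.List.slice? xs (some ((xs.length : Int) - 2)) none (-1) = some xs.dropLast.reverse := by
  unfold PySem.List.slice? PySem.List.sliceIndices
  norm_num
  rw [if_neg (by omega : ¬ xs.length ≤ 1)]
  rw [if_pos (by omega : (-1 : Int) < (xs.length : Int) - 2)]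
  rw [show ((xs.length : Int) - 2 + 1).toNat = xs.length - 1 by omega]
  rw [filterMap_range_eq_map _ _ (fun k => xs.dropLast.reverse.getD k ' ') ?_]
  · apply List.ext_getElem (by simp)
    intro i h1 h2
    have hi : i < xs.length - 1 := by simpa using h1
    simp only [List.getElem_map, List.getElem_range]
    rw [List.getD_eq_getElem _ _ (by simp; omega)]
  · intro k hk
    have hk2 : xs.length - 2 - k < xs.length := by omega
    have hg : k < xs.dropLast.reverse.length := by simp; omega
    have hidx : ((xs.length : Int) - 2 + -(k : Int)).toNat = xs.length - 2 - k := by omega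
    rw [hidx, List.getElem?_eq_getElem hk2]
    show some (xs[xs.length - 2 - k]'hk2) = some (xs.dropLast.reverse.getD k ' ')
    rw [List.getD_eq_getElem _ _ hg]
    simp only [List.getElem_reverse, List.getElem_dropLast, List.length_dropLast]
    congr 1


theorem lineT_palindrome (P E i : Nat) : (lineT P E i).reverse = lineT P E i := by
  simp [lineT, List.reverse_append, pstrL, List.append_assoc]

theorem pol_eq (P E : Nat) (hE : E ≤ 1) :
    PySem.Int.floordiv (2 * (P : Int) + E + 1 - 1) 2 = (P : Int) := by
  rw [PySem.Int.floordiv_eq_iff_of_pos (by norm_num)]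
  omega

theorem mod_eq (P E : Nat) (hE : E ≤ 1) :
    PySem.Int.mod (2 * (P : Int) + E + 1 - 1) 2 = (E : Int) := by
  have h := PySem.Int.floordiv_mul_add_mod (2 * (P : Int) + E + 1 - 1) 2
  rw [pol_eq P E hE] at h
  omega

theorem paint_eq (P E i r t : Nat) (hi : i < P)
    (hrt : (r = i ∧ t = 2 * P + E - i) ∨ (r = 2 * P + E - i ∧ t = i)) :
    (((List.replicate P '-' ++ List.replicate (E + 1) 'X' ++ List.replicate P '-').set r 'X').set t 'X')
      = lineT P E i := by
  apply List.ext_getElem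
    (by rw [lineT_length P E i hi]; simp [List.length_set]; omega)
  intro c h1 h2
  rw [lineT_getElem P E i c hi]
  simp only [List.getElem_set, List.getElem_append, List.length_append,
    List.length_replicate, List.getElem_replicate]
  split_ifs <;> first | rfl | omega

theorem B_canon (P E : Nat) (hP : 3 ≤ P) (hE : E ≤ 1) :
    jackB (2 * (P : Int) + E + 1) = List.intercalate ['\n'] (rowsJ P E) := by
  simp only [jackB, pol_eq P E hE, mod_eq P E hE, PySem.Chars.join]
  congr 1
  rw [PySem.List.pyRange_one 0 (2 * (P : Int) + E + 1), List.map_map,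
    show ((2 * (P : Int) + E + 1) - 0).toNat = 2 * P + E + 1 from by omega]
  rw [show 2 * P + E + 1 = P + ((E + 1) + P) from by omega, List.range_add, List.map_append,
    List.map_map, List.range_add, List.map_append, List.map_map]
  unfold rowsJ
  rw [← List.append_assoc]
  congr 1
  congr 1
  · apply List.map_congr_left
    intro x hx
    have hx' : x < P := List.mem_range.mp hx
    simp only [Function.comp_apply]
    rw [if_neg (by omega), PySem.List.pyRepeat_singleton, PySem.List.pyRepeat_singleton,
      show ((P : Int)).toNat = P from by omega,
      show (2 * (P : Int) + E + 1).toNat = 2 * P + E + 1 from by omega,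
      show ((P : Int) + E + 1).toNat = P + E + 1 from by omega,
      show ((E : Int) + 1).toNat = E + 1 from by omega,
      show ((0 : Int) + (x : Int)).toNat = x from by omega,
      show (2 * (P : Int) + E + 1 - 1 - ((0 : Int) + (x : Int))).toNat = 2 * P + E - x
        from by omega,
      List.take_replicate, List.drop_replicate,
      show min P (2 * P + E + 1) = P from by omega,
      show 2 * P + E + 1 - (P + E + 1) = P from by omega]
    exact paint_eq P E x x (2 * P + E - x) hx' (Or.inl ⟨rfl, rfl⟩)
  · rw [List.map_congr_left (g := fun _ => xrowL P E) (fun x hx => by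
      have hxe : x < E + 1 := List.mem_range.mp hx
      simp only [Function.comp_apply]
      rw [if_pos (by constructor <;> omega), PySem.List.pyRepeat_singleton,
        show (2 * (P : Int) + E + 1).toNat = 2 * P + E + 1 from by omega]
      rfl)]
    simp
  · apply List.map_congr_left
    intro x hx
    have hx' : x < P := List.mem_range.mp hx
    simp only [Function.comp_apply]
    rw [if_neg (by omega), PySem.List.pyRepeat_singleton, PySem.List.pyRepeat_singleton,
      show ((P : Int)).toNat = P from by omega,
      show (2 * (P : Int) + E + 1).toNat = 2 * P + E + 1 from by omega,
      show ((P : Int) + E + 1).toNat = P + E + 1 from by omega,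
      show ((E : Int) + 1).toNat = E + 1 from by omega,
      show ((0 : Int) + ((P + (E + 1 + x) : Nat) : Int)).toNat = P + E + 1 + x from by omega,
      show (2 * (P : Int) + E + 1 - 1 - ((0 : Int) + ((P + (E + 1 + x) : Nat) : Int))).toNat
          = P - 1 - x from by omega,
      List.take_replicate, List.drop_replicate,
      show min P (2 * P + E + 1) = P from by omega,
      show 2 * P + E + 1 - (P + E + 1) = P from by omega]
    exact paint_eq P E (P - 1 - x) (P + E + 1 + x) (P - 1 - x) (by omega)
      (Or.inr ⟨by omega, rfl⟩)

theorem A_canon (P E : Nat) (hP : 3 ≤ P) (hE : E ≤ 1) :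
    jackA (2 * (P : Int) + E + 1) = List.intercalate ['\n'] (rowsJ P E) := by
  simp only [jackA, pol_eq P E hE, mod_eq P E hE]
  rw [PySem.List.pyRange_one 0 (P : Int), show ((P : Int) - 0).toNat = P from by omega,
    List.foldl_map]
  rw [PySem.List.foldl_congr_mem _ _ (fun acc k => acc ++ (lineT P E k ++ ['\n'])) _ ?hbody]
  case hbody =>
    intro acc x hx
    have hx' : x < P := List.mem_range.mp hx
    simp only [PySem.List.pyRepeat_singleton, PySem.List.slice?_none_none_neg_one,
      Option.getD_some]
    rw [show ((0 : Int) + (x : Int)).toNat = x from by omega,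
      show ((P : Int) - ((0 : Int) + (x : Int)) - 1).toNat = P - 1 - x from by omega,
      show ((E : Int) + 1).toNat = E + 1 from by omega]
    simp [lineT, pstrL, List.append_assoc]
  rw [PySem.List.foldl_append_eq_flatMap, List.nil_append]
  rw [show (List.range P).flatMap (fun k => lineT P E k ++ ['\n'])
      = ((List.range P).map (lineT P E)).flatMap (fun r => r ++ ['\n']) from by
    simp [List.flatMap_map]]
  have hTOPne : (List.range P).map (lineT P E) ≠ [] := by
    simp [List.range_eq_nil]; omega
  have hres2 : 2 ≤ (((List.range P).map (lineT P E)).flatMap (fun r => r ++ ['\n'])).length := by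
    rw [show P = (P - 1) + 1 from by omega, List.range_succ, List.map_append,
      List.flatMap_append]
    simp [lineT, pstrL]
    omega
  rw [slice_last2 _ hres2, Option.getD_some]
  rw [flatMap_newline_eq '\n' _ hTOPne, List.dropLast_concat]
  rw [intercalate_reverse]
  have hmidA : PySem.List.pyRepeat
      (PySem.List.pyRepeat ['X'] (2 * (P : Int) + E + 1) ++ ['\n']) ((E : Int) + 1)
      = (List.replicate (E + 1) (xrowL P E)).flatMap (fun r => r ++ ['\n']) := by
    rw [PySem.List.pyRepeat_singleton,
      show (2 * (P : Int) + E + 1).toNat = 2 * P + E + 1 from by omega]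
    unfold PySem.List.pyRepeat
    rw [show ((E : Int) + 1).toNat = E + 1 from by omega]
    simp [xrowL, List.flatMap_def, List.map_replicate]
  rw [hmidA, flatMap_newline_eq '\n' _ (by simp)]
  have hbot : (((List.range P).map (lineT P E)).reverse.map List.reverse)
      = (List.range P).map (fun j => lineT P E (P - 1 - j)) := by
    rw [← List.map_reverse, reverse_range, List.map_map, List.map_map]
    exact List.map_congr_left (fun x _ => lineT_palindrome P E (P - 1 - x))
  rw [hbot]
  unfold rowsJ
  rw [intercalate_append_ne '\n' _ _ (by simp [List.range_eq_nil]; try omega) (by simp [List.range_eq_nil]; try omega),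
    intercalate_append_ne '\n' _ _ hTOPne (by simp)]
  simp [List.append_assoc]

theorem jackA_eq_jackB (P E : Nat) (hP : 3 ≤ P) (hE : E ≤ 1) :
    jackA (2 * (P : Int) + E + 1) = jackB (2 * (P : Int) + E + 1) := by
  rw [A_canon P E hP hE, B_canon P E hP hE]

-- ===== VERDICT (by name: the statement is the Claim_ definition above) =====
theorem union_jack_spec : Claim_equal_union_jack := by
  intro n _
  unfold Spec_union_jack union_jack union_jack_alt
  set m : Int := max 7 n with hm
  have hm7 : 7 ≤ m := le_max_left _ _
  obtain ⟨P, E, hP, hE, hmeq⟩ : ∃ P E : Nat, 3 ≤ P ∧ E ≤ 1 ∧ m = 2 * (P : Int) + E + 1 := by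
    refine ⟨((m - 1) / 2).toNat, ((m - 1) % 2).toNat, by omega, by omega, by omega⟩
  rw [hmeq, jackA_eq_jackB P E hP hE]
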